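-- pv_equiv track=rewrite | github.com/DrKaiyangZheng/VITAP | scripts/VITAP_upd_20241007.py | fill_empty_cells
-- ===== SOURCE A (Python) =====
-- def fill_empty_cells(row, header):
-- 	filled_row = [row[0]]
-- 	for idx, cell in enumerate(row[1:], 1):
-- 		if cell != '':
-- 			filled_row.append(cell)
-- 		else:
-- 			for next_cell in row[idx+1:]:
-- 				if next_cell != '':
-- 					filled_row.append(f"[{header[idx]}]_{next_cell}")
-- 					break
-- 			else:
-- 				filled_row.append("")
-- 	return filled_row
-- ===== SOURCE B (Python) =====
-- def fill_empty_cells(row, header):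
--     # Right-to-left pass: nxt[i] = next non-empty cell strictly after i ('' if none).
--     n = len(row)
--     nxt = [''] * n
--     last = ''
--     for i in range(n - 1, -1, -1):
--         nxt[i] = last
--         if row[i] != '':
--             last = row[i]
--     out = [row[0]]
--     for i in range(1, n):
--         cell = row[i]
--         if cell != '':
--             out.append(cell)
--         elif nxt[i] != '':
--             out.append(f"[{header[i]}]_{nxt[i]}")
--         else:
--             out.append("")
--     return out
-- ===== Notes on version B (the rewrite author's own statement) =====
-- stated objective: alternative
-- what changed: Replaces A's per-empty-cell forward rescan of the rest of the row with one right-to-left pass that precomputes the next non-empty cell for every position, followed by a single forward fill.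
import Mathlib
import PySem

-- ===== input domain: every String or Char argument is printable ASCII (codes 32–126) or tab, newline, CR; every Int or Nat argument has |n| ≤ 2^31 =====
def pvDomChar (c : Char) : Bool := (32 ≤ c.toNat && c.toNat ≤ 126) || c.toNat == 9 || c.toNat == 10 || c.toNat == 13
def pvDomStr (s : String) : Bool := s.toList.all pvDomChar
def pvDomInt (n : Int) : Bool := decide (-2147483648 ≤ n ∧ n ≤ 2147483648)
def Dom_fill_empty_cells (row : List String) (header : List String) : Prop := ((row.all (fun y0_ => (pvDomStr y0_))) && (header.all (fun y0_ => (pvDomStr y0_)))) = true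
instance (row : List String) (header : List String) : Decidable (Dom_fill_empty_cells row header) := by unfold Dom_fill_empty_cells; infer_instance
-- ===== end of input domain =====

-- B replaces A's per-empty-cell forward rescan by a right-to-left precomputation
-- of the next non-empty cell plus a single forward fill (alternative algorithm).

-- ===== PORT A =====
-- the outer 'for idx, cell in enumerate(row[1:], 1)' loop; the inner
-- 'for next_cell in row[idx+1:] … break / else' is the first non-empty
-- element of row[idx+1:] (row.drop (idx+1): the index idx+1 ≥ 0, so the
-- Python slice is exactly List.drop), found with find?.
def fillA_loop (row : List String) (header : List String) : Nat → List String → List String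
  | _, [] => []
  | idx, cell :: rest =>
    (if cell ≠ "" then cell
     else
       match (row.drop (idx + 1)).find? (fun s => s ≠ "") with
       | some next_cell => "[" ++ header.getD idx "" ++ "]_" ++ next_cell
       | none => "") :: fillA_loop row header (idx + 1) rest

-- filled_row = [row[0]]; outside Pre_ (empty row) Python raises, the port defaults.
def fill_empty_cells (row : List String) (header : List String) : List String :=
  PySem.List.pyGetD row 0 "" :: fillA_loop row header 1 (row.drop 1)

-- ===== PORT B =====
-- right-to-left pass of Source B: returns (last, nxt) where nxt[i] is the next
-- non-empty cell strictly after position i ('' if none).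
def nxtOf (row : List String) : String × List String :=
  row.foldr (fun cell acc => (if cell ≠ "" then cell else acc.1, acc.1 :: acc.2)) ("", [])

-- the forward fill 'for i in range(1, n)' of Source B
def fill_empty_cells_alt (row : List String) (header : List String) : List String :=
  let nxt := (nxtOf row).2
  PySem.List.pyGetD row 0 "" ::
    (List.range' 1 (row.length - 1)).map (fun i =>
      let cell := row.getD i ""
      if cell ≠ "" then cell
      else
        let nx := nxt.getD i ""
        if nx ≠ "" then "[" ++ header.getD i "" ++ "]_" ++ nx else "")

-- ===== PRECONDITION & SPEC =====
-- Pre_ excludes exactly the inputs where the Python A raises IndexError: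
-- the empty row ('row[0]'), and rows with an empty cell at a position idx ≥ 1
-- that has a later non-empty cell but idx ≥ len(header) ('header[idx]').
-- (B's Python raises on exactly the same inputs.)
def Pre_fill_empty_cells (row : List String) (header : List String) : Prop :=
  row ≠ [] ∧
    ∀ i ∈ List.range row.length,
      (1 ≤ i ∧ row.getD i "" = "" ∧ (row.drop (i + 1)).any (fun s => s ≠ "")) →
        i < header.length
instance (row : List String) (header : List String) : Decidable (Pre_fill_empty_cells row header) := by unfold Pre_fill_empty_cells; infer_instance

def pvWitness_fill_empty_cells : List String × List String :=
  (["a", "", "b"], ["h0", "h1", "h2"])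

def Spec_fill_empty_cells (row : List String) (header : List String) (out : List String) : Prop := out = fill_empty_cells_alt row header
instance (row : List String) (header : List String) (out : List String) : Decidable (Spec_fill_empty_cells row header out) := by unfold Spec_fill_empty_cells; infer_instance

-- ===== CLAIM (what is proved, stated in full; the proofs are below) =====
def Claim_equal_fill_empty_cells : Prop := ∀ (row : List String) (header : List String), Dom_fill_empty_cells row header → Pre_fill_empty_cells row header → Spec_fill_empty_cells row header (fill_empty_cells row header)

-- ===== LEMMAS AND PROOFS =====

-- next non-empty element of a list, '' if none
def nextStr (l : List String) : String := ((l.find? (fun s => s ≠ "")).getD "")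

theorem nxtOf_fst (row : List String) : (nxtOf row).1 = nextStr row := by
  induction row with
  | nil => rfl
  | cons c t ih =>
    simp only [nxtOf, List.foldr_cons, nextStr, List.find?] at *
    by_cases h : c = ""
    · simp [h] at *; exact ih
    · simp [h]

theorem nxtOf_snd_getD (row : List String) (i : Nat) :
    (nxtOf row).2.getD i "" = nextStr (row.drop (i + 1)) := by
  induction row generalizing i with
  | nil => simp [nxtOf, nextStr]
  | cons c t ih =>
    cases i with
    | zero =>
      simpa [nxtOf, List.foldr_cons] using nxtOf_fst t
    | succ j =>
      simpa [nxtOf, List.foldr_cons] using ih j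

theorem fillA_loop_eq (row header : List String) (k : Nat) (h : k ≤ row.length) :
    fillA_loop row header k (row.drop k) =
      (List.range' k (row.length - k)).map (fun i =>
        let cell := row.getD i ""
        if cell ≠ "" then cell
        else
          let nx := nextStr (row.drop (i + 1))
          if nx ≠ "" then "[" ++ header.getD i "" ++ "]_" ++ nx else "") := by
  generalize hr : row.drop k = rest
  induction rest generalizing k with
  | nil =>
    have : row.length - k = 0 := by
      have := congrArg List.length hr
      simp [List.length_drop] at this
      omega
    simp [this, fillA_loop]
  | cons cell rest ih =>
    have hk : k < row.length := by
      by_contra hk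
      have : row.drop k = [] := List.drop_eq_nil_of_le (by omega)
      rw [this] at hr; simp at hr
    have hdrop : row.drop (k + 1) = rest := by
      have := congrArg List.tail hr
      simpa [List.tail_drop] using this
    have hcell : row.getD k "" = cell := by
      have : row.getD k "" = (row.drop k).getD 0 "" := by
        simp [List.getD, List.getElem?_drop]
      rw [this, hr]; rfl
    have hlen : row.length - k = (row.length - (k + 1)) + 1 := by omega
    rw [hlen, List.range'_succ, List.map_cons]
    have := ih (k + 1) (by omega) hdrop
    rw [fillA_loop, hdrop, this, hcell]
    congr 1
    by_cases hc : cell = ""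
    · simp only [hc, nextStr, ne_eq, not_true_eq_false, if_false, decide_not]
      cases hfind : rest.find? (fun s => !decide (s = "")) with
      | none => simp
      | some nc =>
        have hnc : nc ≠ "" := by simpa using List.find?_some hfind
        simp [hnc]
    · simp [hc]

-- ===== VERDICT (by name: the statement is the Claim_ definition above) =====
theorem fill_empty_cells_spec : Claim_equal_fill_empty_cells := by
  intro row header _ _
  unfold Spec_fill_empty_cells fill_empty_cells fill_empty_cells_alt
  by_cases hle : 1 ≤ row.length
  · rw [fillA_loop_eq row header 1 hle]
    simp only [nxtOf_snd_getD]
  · have : row = [] := by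
      cases row with
      | nil => rfl
      | cons a t => simp at hle
    subst this
    rfl
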